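-- pv_equiv track=rewrite | github.com/uttom-akash/Problem-Solving-Second-Phase-2020 | hackerrank/search/SimilarPair.py | dfs
-- ===== SOURCE A (Python) =====
-- def bitQuery(biTree,index):
--     res=0
--     while index > 0 :
--         res+=biTree[index]
--         index-=(index & -index)
--     return res
--
-- def biUpdate(biTree,index,value):
--     length=len(biTree)
--     while index < length:
--         biTree[index]+=value
--         index+=(index & -index)
--
-- def dfs(graph,biTree,n,u,k,visited):
--     visited[u]=True
--     similarPairs=bitQuery(biTree,min(u+k,n))-bitQuery(biTree,max(0,u-k-1))
--     biUpdate(biTree,u,1)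
--
--     for v in graph[u]:
--         if visited[v]==False:
--             similarPairs+=dfs(graph,biTree,n,v,k,visited)
--
--     biUpdate(biTree,u,-1)
--     return similarPairs
-- ===== SOURCE B (Python) =====
-- def dfs(graph, biTree, n, u, k, visited):
--     # Query-only re-implementation: no Fenwick updates at all; each node adds the
--     # prefix sums of the untouched biTree plus a direct count over the explicit
--     # ancestor stack.  Return value only: A transiently mutates biTree (net effect
--     # zero), B leaves it alone; both mark visited in place.
--     def pref(j):
--         return pref(j - (j & -j)) + biTree[j] if j > 0 else 0
--
--     anc = []
--
--     def go(u):
--         visited[u] = True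
--         hi = min(u + k, n)
--         lo = max(0, u - k - 1)
--         pairs = pref(hi) - pref(lo)
--         pairs += sum(1 for w in anc if 0 < w <= hi) - sum(1 for w in anc if 0 < w <= lo)
--         anc.append(u)
--         for v in graph[u]:
--             if not visited[v]:
--                 pairs += go(v)
--         anc.pop()
--         return pairs
--
--     return go(u)
-- ===== Notes on version B (the rewrite author's own statement) =====
-- stated objective: alternative
-- what changed: Removes the Fenwick +1/-1 update walks entirely: each node queries prefix sums of the untouched input array and adds a direct count over an explicit ancestor stack instead of querying a mutated tree.
-- outside the precondition, e.g. on dfs([[], [6, 1]], [], -1, 0, -1, [False, False, False]): A returns 0, B returns 0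
import Mathlib
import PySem

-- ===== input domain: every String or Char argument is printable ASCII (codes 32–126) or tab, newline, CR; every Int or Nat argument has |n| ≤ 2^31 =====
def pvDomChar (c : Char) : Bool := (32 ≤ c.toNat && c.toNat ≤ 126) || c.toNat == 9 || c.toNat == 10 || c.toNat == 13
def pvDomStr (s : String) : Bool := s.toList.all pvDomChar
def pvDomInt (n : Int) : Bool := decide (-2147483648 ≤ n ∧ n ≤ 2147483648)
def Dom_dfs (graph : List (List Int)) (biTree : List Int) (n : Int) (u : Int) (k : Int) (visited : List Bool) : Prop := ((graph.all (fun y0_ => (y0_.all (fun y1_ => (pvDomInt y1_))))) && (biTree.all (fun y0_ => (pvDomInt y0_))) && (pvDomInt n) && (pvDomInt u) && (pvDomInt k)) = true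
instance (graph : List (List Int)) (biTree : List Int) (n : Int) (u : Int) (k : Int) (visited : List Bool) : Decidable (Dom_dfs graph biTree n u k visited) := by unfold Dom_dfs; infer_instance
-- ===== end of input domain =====

-- B removes A's Fenwick +1/-1 update walks: it queries prefix sums of the untouched input
-- array and counts over an explicit ancestor stack.  Return value only: A transiently
-- mutates biTree (net effect zero), B leaves it alone; both mark visited in place.

-- ===== PORT A =====

-- Python's `index & -index` (two's-complement &), via PySem's Python-exact `band`.
def pyLowbit (i : Int) : Int := PySem.Int.band i (-i)

theorem pyLowbit_eq {i : Int} (h : 0 < i) :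
    pyLowbit i = ((i.toNat - (i.toNat &&& (i.toNat - 1)) : ℕ) : ℤ) := by
  unfold pyLowbit PySem.Int.band
  have h1 : (0:ℤ) ≤ i := le_of_lt h
  have h2 : ¬ (0:ℤ) ≤ -i := by omega
  rw [if_pos h1, if_neg h2]
  simp only [neg_neg]
  have e : (i - 1).toNat = i.toNat - 1 := by omega
  rw [e]

-- the fact the loops' termination measures need: for positive i, 1 ≤ lowbit i ≤ i
theorem pyLowbit_pos {i : Int} (h : 0 < i) : 0 < pyLowbit i ∧ pyLowbit i ≤ i := by
  rw [pyLowbit_eq h]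
  have hm : 0 < i.toNat := by omega
  have : i.toNat &&& (i.toNat - 1) ≤ i.toNat - 1 := Nat.and_le_right
  omega

def bitQueryGo (biTree : List Int) (index : Int) (res : Int) : Int :=
  if h : 0 < index then
    bitQueryGo biTree (index - pyLowbit index) (res + PySem.List.pyGetD biTree index 0)
  else res
termination_by index.toNat
decreasing_by have := pyLowbit_pos h; omega

def bitQuery (biTree : List Int) (index : Int) : Int := bitQueryGo biTree index 0

-- `0 < index` is a totality guard only: Python's biUpdate diverges for index ≤ 0 < length
-- (the `index & -index` step is then ≤ 0 forever); Pre_dfs keeps every updated index positive.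
def biUpdateGo (biTree : List Int) (index : Int) (value : Int) : List Int :=
  if h : index < (biTree.length : Int) ∧ 0 < index then
    biUpdateGo (PySem.List.pySetD biTree index (PySem.List.pyGetD biTree index 0 + value))
      (index + pyLowbit index) value
  else biTree
termination_by ((biTree.length : Int) - index).toNat
decreasing_by
  have := pyLowbit_pos h.2
  simp [PySem.List.length_pySetD]
  omega

-- fuel = visited.length + 1 bounds the recursion depth (each deeper call flips a distinct
-- False in visited to True), so the fuel guard is never reached where the Python returns.
def dfsGoA (graph : List (List Int)) (n k : Int) : Nat → Int → List Int → List Bool → Int × List Int × List Bool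
  | 0, _, bt, vis => (0, bt, vis)
  | fuel+1, u, bt, vis =>
    let vis1 := PySem.List.pySetD vis u true
    let sp := bitQuery bt (min (u + k) n) - bitQuery bt (max 0 (u - k - 1))
    let bt1 := biUpdateGo bt u 1
    let st := (PySem.List.pyGetD graph u []).foldl
      (fun (acc : Int × List Int × List Bool) v =>
        if PySem.List.pyGetD acc.2.2 v false = false then
          let r := dfsGoA graph n k fuel v acc.2.1 acc.2.2
          (acc.1 + r.1, r.2.1, r.2.2)
        else acc) (sp, bt1, vis1)
    (st.1, biUpdateGo st.2.1 u (-1), st.2.2)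

def dfs (graph : List (List Int)) (biTree : List Int) (n : Int) (u : Int) (k : Int) (visited : List Bool) : Int :=
  (dfsGoA graph n k (visited.length + 1) u biTree visited).1

-- ===== PORT B =====

-- Source B's `pref`: prefix sum of the (never-mutated) input array, query walk only
def prefQ (biTree : List Int) (j : Int) : Int :=
  if h : 0 < j then prefQ biTree (j - pyLowbit j) + PySem.List.pyGetD biTree j 0 else 0
termination_by j.toNat
decreasing_by have := pyLowbit_pos h; omega

def dfsGoB (graph : List (List Int)) (bt0 : List Int) (n k : Int) : Nat → Int → List Int → List Bool → Int × List Bool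
  | 0, _, _, vis => (0, vis)
  | fuel+1, u, anc, vis =>
    let vis1 := PySem.List.pySetD vis u true
    let hi := min (u + k) n
    let lo := max 0 (u - k - 1)
    let p : Int := prefQ bt0 hi - prefQ bt0 lo
      + ((anc.countP (fun w => decide (0 < w ∧ w ≤ hi)) : Nat) : Int)
      - ((anc.countP (fun w => decide (0 < w ∧ w ≤ lo)) : Nat) : Int)
    (PySem.List.pyGetD graph u []).foldl
      (fun (acc : Int × List Bool) v =>
        if PySem.List.pyGetD acc.2 v false = false then
          let r := dfsGoB graph bt0 n k fuel v (anc ++ [u]) acc.2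
          (acc.1 + r.1, r.2)
        else acc) (p, vis1)

def dfs_alt (graph : List (List Int)) (biTree : List Int) (n : Int) (u : Int) (k : Int) (visited : List Bool) : Int :=
  (dfsGoB graph biTree n k (visited.length + 1) u [] visited).1

-- ===== PRECONDITION & SPEC =====
-- A node v is safe to visit: positive label, indexable in graph/visited, both query bounds
-- inside biTree (so biUpdate terminates and no biTree index escapes).
def safeNodeB (graph : List (List Int)) (biTree : List Int) (n : Int) (k : Int) (visited : List Bool) (v : Int) : Bool :=
  decide (1 ≤ v ∧ v < (graph.length : Int) ∧ v < (visited.length : Int) ∧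
    max 0 (v - k - 1) < (biTree.length : Int) ∧ min (v + k) n < (biTree.length : Int))

-- every listed neighbour is either already visited (in range, possibly via Python's
-- negative-index wraparound) or itself safe to visit
def rowOKB (graph : List (List Int)) (biTree : List Int) (n : Int) (k : Int) (visited : List Bool) (row : List Int) : Bool :=
  row.all (fun v =>
    (decide (-(visited.length : Int) ≤ v ∧ v < (visited.length : Int)) && PySem.List.pyGetD visited v false)
    || safeNodeB graph biTree n k visited v)

-- Pre_ = the root is safe and every row the traversal could read (the root's, and the row of
-- any safe still-unvisited node) only lists visited-or-safe neighbours: the closed-form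
-- guarantee that A never raises IndexError (an index past an array) and never enters biUpdate
-- with a label <= 0, where `index & -index` stops growing and the loop never terminates; being
-- closed-form it over-approximates reachability, so it also excludes some inputs on which A
-- does return (a row of a never-actually-reached safe node listing an unsafe label, or an
-- unsafe root that happens to touch nothing, e.g. with an empty biTree) — see the cites.
def Pre_dfs (graph : List (List Int)) (biTree : List Int) (n : Int) (u : Int) (k : Int) (visited : List Bool) : Prop :=
  safeNodeB graph biTree n k visited u = true ∧
  (∀ i : ℕ, i < graph.length → safeNodeB graph biTree n k visited (i : Int) = true →
    ((i : Int) = u ∨ visited.getD i false = false) →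
    rowOKB graph biTree n k visited (graph.getD i []) = true)
instance (graph : List (List Int)) (biTree : List Int) (n : Int) (u : Int) (k : Int) (visited : List Bool) : Decidable (Pre_dfs graph biTree n u k visited) := by unfold Pre_dfs; infer_instance

def pvWitness_dfs : List (List Int) × List Int × Int × Int × Int × List Bool :=
  ([[], [2], [1]], [0, 3, -1], 2, 1, 1, [false, false, false])

def Spec_dfs (graph : List (List Int)) (biTree : List Int) (n : Int) (u : Int) (k : Int) (visited : List Bool) (out : Int) : Prop := out = dfs_alt graph biTree n u k visited
instance (graph : List (List Int)) (biTree : List Int) (n : Int) (u : Int) (k : Int) (visited : List Bool) (out : Int) : Decidable (Spec_dfs graph biTree n u k visited out) := by unfold Spec_dfs; infer_instance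

-- ===== CLAIM (what is proved, stated in full; the proofs are below) =====
def Claim_equal_dfs : Prop := ∀ (graph : List (List Int)) (biTree : List Int) (n : Int) (u : Int) (k : Int) (visited : List Bool), Dom_dfs graph biTree n u k visited → Pre_dfs graph biTree n u k visited → Spec_dfs graph biTree n u k visited (dfs graph biTree n u k visited)

-- ===== LEMMAS AND PROOFS =====

def lbN (m : ℕ) : ℕ :=
  if m = 0 then 0
  else if m % 2 = 1 then 1 else 2 * lbN (m / 2)
termination_by m
decreasing_by exact Nat.div_lt_self (by omega) (by omega)

theorem lbN_odd {m : ℕ} (h : m % 2 = 1) : lbN m = 1 := by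
  rw [lbN]; simp [h]; omega

theorem lbN_two_mul (q : ℕ) (h : 0 < q) : lbN (2 * q) = 2 * lbN q := by
  rw [lbN]
  have h1 : ¬ (2*q = 0) := by omega
  have h2 : ¬ (2*q % 2 = 1) := by omega
  simp [h1, h2, Nat.mul_div_cancel_left]

theorem lbN_pos {m : ℕ} (h : 0 < m) : 0 < lbN m := by
  induction m using Nat.strong_induction_on with
  | _ m ih =>
    rcases Nat.even_or_odd m with he | ho
    · obtain ⟨q, hq⟩ := he
      have hq' : m = 2 * q := by omega
      have : 0 < q := by omega
      rw [hq', lbN_two_mul q this]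
      have := ih q (by omega) this
      omega
    · have : m % 2 = 1 := Nat.odd_iff.mp ho
      rw [lbN_odd this]; omega

theorem lbN_le {m : ℕ} (h : 0 < m) : lbN m ≤ m := by
  induction m using Nat.strong_induction_on with
  | _ m ih =>
    rcases Nat.even_or_odd m with he | ho
    · obtain ⟨q, hq⟩ := he
      have hq' : m = 2 * q := by omega
      have hqp : 0 < q := by omega
      rw [hq', lbN_two_mul q hqp]
      have := ih q (by omega) hqp
      omega
    · have : m % 2 = 1 := Nat.odd_iff.mp ho
      rw [lbN_odd this]; omega

theorem land_bits (a b : Nat) (b0 b1 : Nat) (h0 : b0 ≤ 1) (h1 : b1 ≤ 1) :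
    (2*a+b0) &&& (2*b+b1) = 2*(a &&& b) + (b0 &&& b1) := by
  apply Nat.eq_of_testBit_eq
  intro i
  have e : ∀ (x c : Nat), c ≤ 1 → ∀ j, (2*x+c).testBit j = if j = 0 then decide (c = 1) else x.testBit (j-1) := by
    intro x c hc j
    cases j with
    | zero =>
      interval_cases c <;> simp [Nat.testBit_zero, Nat.mul_comm]
    | succ m =>
      have : (2*x+c)/2 = x := by omega
      simp [Nat.testBit_add_one, this]
  have hb : b0 &&& b1 ≤ 1 := by interval_cases b0 <;> interval_cases b1 <;> decide
  rw [Nat.testBit_land, e _ _ h0, e _ _ h1, e _ _ hb]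
  cases i with
  | zero =>
    interval_cases b0 <;> interval_cases b1 <;> simp
  | succ m => simp [Nat.testBit_land]

theorem land_pred {m : ℕ} (h : 0 < m) : m &&& (m - 1) = m - lbN m := by
  induction m using Nat.strong_induction_on with
  | _ m ih =>
    rcases Nat.even_or_odd m with he | ho
    · obtain ⟨q, hq⟩ := he
      have hqp : 0 < q := by omega
      have key := land_bits q (q-1) 0 1 (by omega) (by omega)
      have e : m &&& (m - 1) = 2*(q &&& (q-1)) + (0 &&& 1) := by
        rw [← key]; congr 1 <;> omega
      have ihq := ih q (by omega) hqp
      have hle := lbN_le hqp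
      have hpos := lbN_pos hqp
      have hm : m = 2 * q := by omega
      have ez : (0 &&& 1 : ℕ) = 0 := by decide
      rw [e, ez, hm, lbN_two_mul q hqp]
      omega
    · have hm : m % 2 = 1 := Nat.odd_iff.mp ho
      have key := land_bits (m/2) (m/2) 1 0 (by omega) (by omega)
      have e : m &&& (m - 1) = 2*((m/2) &&& (m/2)) + (1 &&& 0) := by
        rw [← key]; congr 1 <;> omega
      have hs : (m/2) &&& (m/2) = m/2 := by
        apply Nat.eq_of_testBit_eq; intro j; simp [Nat.testBit_land]
      have ez : (1 &&& 0 : ℕ) = 0 := by decide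
      rw [e, hs, ez, lbN_odd hm]
      omega

theorem pyLowbit_natCast {m : ℕ} (h : 0 < m) : pyLowbit (m : ℤ) = (lbN m : ℤ) := by
  have h' : (0:ℤ) < m := by exact_mod_cast h
  rw [pyLowbit_eq h']
  have : (m:ℤ).toNat = m := by omega
  rw [this, land_pred h]
  have := lbN_le h
  omega

-- parity of lbN: m - lbN m is always even
theorem lbN_parity {m : ℕ} (h : 0 < m) : (m - lbN m) % 2 = 0 := by
  rcases Nat.even_or_odd m with he | ho
  · obtain ⟨q, hq⟩ := he
    have hq' : m = 2 * q := by omega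
    have hqp : 0 < q := by omega
    rw [hq', lbN_two_mul q hqp]
    have := lbN_le hqp
    omega
  · have hm : m % 2 = 1 := Nat.odd_iff.mp ho
    rw [lbN_odd hm]; omega

theorem lbN_even_of_even {m : ℕ} (h : 0 < m) (he : m % 2 = 0) : lbN m % 2 = 0 := by
  have hq' : m = 2 * (m/2) := by omega
  have hqp : 0 < m/2 := by omega
  rw [hq', lbN_two_mul _ hqp]; omega

theorem A1 : ∀ i u : ℕ, 1 ≤ u → u < i →
    ((i - lbN i < u) ↔ (u + lbN u ≤ i ∧ i - lbN i < u + lbN u)) := by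
  intro i
  induction i using Nat.strong_induction_on with
  | _ i ih =>
    intro u hu hui
    have hip : 0 < i := by omega
    rcases Nat.even_or_odd u with hue | huo
    · rcases Nat.even_or_odd i with hie | hio
      · -- both even: halve
        have hu2 : u % 2 = 0 := Nat.even_iff.mp hue
        have hi2 : i % 2 = 0 := Nat.even_iff.mp hie
        have hu' : u = 2 * (u/2) := by omega
        have hi' : i = 2 * (i/2) := by omega
        have hup : 0 < u/2 := by omega
        have hip' : 0 < i/2 := by omega
        have elu : lbN u = 2 * lbN (u/2) := by
          conv_lhs => rw [hu']
          exact lbN_two_mul _ hup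
        have eli : lbN i = 2 * lbN (i/2) := by
          conv_lhs => rw [hi']
          exact lbN_two_mul _ hip'
        have hIH := ih (i/2) (by omega) (u/2) (by omega) (by omega)
        have l1 := lbN_le hup
        have l2 := lbN_le hip'
        omega
      · -- u even, i odd
        have hi1 : lbN i = 1 := lbN_odd (Nat.odd_iff.mp hio)
        have hue' : u % 2 = 0 := Nat.even_iff.mp hue
        have hpar : (u + lbN u) % 2 = 0 := by
          have := lbN_even_of_even (by omega : 0 < u) hue'
          omega
        have hi2 : i % 2 = 1 := Nat.odd_iff.mp hio
        have hu2 : u % 2 = 0 := Nat.even_iff.mp hue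
        omega
    · -- u odd
      have hu1 : lbN u = 1 := lbN_odd (Nat.odd_iff.mp huo)
      have hpar := lbN_parity hip
      have hle := lbN_le hip
      have hpos := lbN_pos hip
      have hu2 : u % 2 = 1 := Nat.odd_iff.mp huo
      omega

theorem A1Z (i u : ℤ) (hu : 1 ≤ u) (hui : u < i) :
    ((i - pyLowbit i < u) ↔ (u + pyLowbit u ≤ i ∧ i - pyLowbit i < u + pyLowbit u)) := by
  have hiN : i = ((i.toNat : ℕ) : ℤ) := by omega
  have huN : u = ((u.toNat : ℕ) : ℤ) := by omega
  rw [hiN, huN, pyLowbit_natCast (by omega), pyLowbit_natCast (by omega)]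
  have := A1 i.toNat u.toNat (by omega) (by omega)
  have l1 := lbN_le (show 0 < i.toNat by omega)
  have l2 := lbN_le (show 0 < u.toNat by omega)
  push_cast
  omega

theorem upd_length (bt : List Int) (u v : Int) : (biUpdateGo bt u v).length = bt.length := by
  fun_induction biUpdateGo with
  | case1 bt i h ih => rw [ih]; simp [PySem.List.length_pySetD]
  | case2 => rfl

theorem set_getD (l : List Int) (j i : ℕ) (x : Int) (h : j < l.length) :
    (l.set j x).getD i 0 = if j = i ∧ j < l.length then x else l.getD i 0 := by
  simp [List.getD_eq_getElem?_getD, List.getElem?_set]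
  split_ifs with h1 h2 <;> try rfl
  · simp_all
  · simp_all

theorem upd_get (bt : List Int) (u v : Int) (hu : 1 ≤ u) (i : ℕ) (hi : i < bt.length) :
    (biUpdateGo bt u v).getD i 0 =
      bt.getD i 0 + if ((u ≤ (i:Int)) ∧ ((i:Int) - pyLowbit i < u)) then v else 0 := by
  fun_induction biUpdateGo bt u v with
  | case1 a b c d =>
    have hlb := pyLowbit_pos c.2
    have hd := d (by omega) (by rw [PySem.List.length_pySetD]; exact hi)
    rw [hd]
    have hset : (PySem.List.pySetD a b (PySem.List.pyGetD a b 0 + v)).getD i 0 =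
        a.getD i 0 + if (i:Int) = b then v else 0 := by
      rw [PySem.List.pySetD_of_nonneg _ _ (show (0:Int) ≤ b by omega), set_getD _ _ _ _ (by omega)]
      by_cases hib : (i:Int) = b
      · rw [if_pos ⟨by omega, by omega⟩, if_pos hib]
        rw [PySem.List.pyGetD_eq_getElem _ _ (by omega) c.1]
        rw [List.getD_eq_getElem _ _ hi]
        congr 2
        omega
      · rw [if_neg (by intro hx; exact hib (by omega)), if_neg hib, add_zero]
    rw [hset]
    by_cases hib : (i:Int) = b
    · have h1 : (b ≤ (i:Int) ∧ (i:Int) - pyLowbit (i:Int) < b) := by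
        refine ⟨by omega, ?_⟩
        rw [hib]; omega
      have h2 : ¬ (b + pyLowbit b ≤ (i:Int) ∧ (i:Int) - pyLowbit (i:Int) < b + pyLowbit b) := by
        intro hx; omega
      rw [if_pos h1, if_neg h2, if_pos hib]
      ring
    · rw [if_neg hib]
      rcases lt_or_gt_of_ne (fun h => hib (by omega) : (i:Int) ≠ b) with hlt | hgt
      · rw [if_neg (by intro hx; omega : ¬ (b ≤ (i:Int) ∧ (i:Int) - pyLowbit (i:Int) < b)),
            if_neg (by intro hx; omega : ¬ (b + pyLowbit b ≤ (i:Int) ∧ (i:Int) - pyLowbit (i:Int) < b + pyLowbit b))]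
        ring
      · have heq := A1Z (i:Int) b hu hgt
        have h3 : ((b ≤ (i:Int) ∧ (i:Int) - pyLowbit (i:Int) < b)) ↔
            (b + pyLowbit b ≤ (i:Int) ∧ (i:Int) - pyLowbit (i:Int) < b + pyLowbit b) := by
          constructor
          · intro hx; exact heq.mp hx.2
          · intro hx; exact ⟨by omega, heq.mpr hx⟩
        by_cases h4 : (b ≤ (i:Int) ∧ (i:Int) - pyLowbit (i:Int) < b)
        · rw [if_pos h4, if_pos (h3.mp h4)]; ring
        · rw [if_neg h4, if_neg (fun hx => h4 (h3.mpr hx))]; ring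
  | case2 a b c =>
    have hn : ¬ (b ≤ (i:Int) ∧ (i:Int) - pyLowbit (i:Int) < b) := by
      intro hx
      have : ¬ b < (a.length:Int) := fun hlt => c ⟨hlt, by omega⟩
      omega
    rw [if_neg hn, add_zero]

theorem qgo_acc (bt : List Int) (j r : Int) : bitQueryGo bt j r = r + bitQueryGo bt j 0 := by
  induction hm : j.toNat using Nat.strong_induction_on generalizing j r with
  | _ m ih =>
    by_cases h : 0 < j
    · have hlb := pyLowbit_pos h
      conv_lhs => rw [bitQueryGo.eq_def]
      conv_rhs => rw [bitQueryGo.eq_def]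
      rw [dif_pos h, dif_pos h]
      rw [ih (j - pyLowbit j).toNat (by omega) _ _ rfl,
          ih (j - pyLowbit j).toNat (by omega) (j - pyLowbit j) (0 + PySem.List.pyGetD bt j 0) rfl]
      ring
    · conv_lhs => rw [bitQueryGo.eq_def]
      conv_rhs => rw [bitQueryGo.eq_def]
      rw [dif_neg h, dif_neg h]
      ring

-- B's query walk computes exactly A's bitQuery on the same (fixed) array
theorem pref_eq (bt : List Int) (j : Int) : prefQ bt j = bitQuery bt j := by
  unfold bitQuery
  induction hm : j.toNat using Nat.strong_induction_on generalizing j with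
  | _ m ih =>
    by_cases h : 0 < j
    · have hlb := pyLowbit_pos h
      rw [prefQ, dif_pos h, bitQueryGo.eq_def, dif_pos h, qgo_acc,
          ih (j - pyLowbit j).toNat (by omega) _ rfl]
      ring
    · rw [prefQ, dif_neg h, bitQueryGo.eq_def, dif_neg h]

theorem qry_nonpos (bt : List Int) (j : Int) (h : j ≤ 0) : bitQuery bt j = 0 := by
  unfold bitQuery
  rw [bitQueryGo.eq_def, dif_neg (by omega)]

theorem qry_upd (bt : List Int) (u v j : Int) (hu : 1 ≤ u) (hj0 : 0 ≤ j)
    (hj : j < (bt.length : Int)) :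
    bitQuery (biUpdateGo bt u v) j = bitQuery bt j + if u ≤ j then v else 0 := by
  unfold bitQuery
  induction hm : j.toNat using Nat.strong_induction_on generalizing j with
  | _ m ih =>
    by_cases h : 0 < j
    · have hlb := pyLowbit_pos h
      conv_lhs => rw [bitQueryGo.eq_def]
      conv_rhs => rw [bitQueryGo.eq_def]
      rw [dif_pos h, dif_pos h, qgo_acc, qgo_acc (bt := bt)]
      have hjj : j = ((j.toNat : ℕ) : Int) := by omega
      have hget : PySem.List.pyGetD (biUpdateGo bt u v) j 0 =
          PySem.List.pyGetD bt j 0 + if (u ≤ j ∧ j - pyLowbit j < u) then v else 0 := by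
        rw [hjj, PySem.List.pyGetD_natCast, PySem.List.pyGetD_natCast]
        have := upd_get bt u v hu j.toNat (by omega)
        rw [this]
      have hrec := ih (j - pyLowbit j).toNat (by omega) (j - pyLowbit j) (by omega) (by omega) rfl
      rw [hget, hrec]
      have hcase : (if (u ≤ j ∧ j - pyLowbit j < u) then v else 0) +
          (if u ≤ j - pyLowbit j then v else 0) = (if u ≤ j then v else 0) := by
        by_cases h1 : u ≤ j - pyLowbit j
        · rw [if_pos h1, if_neg (by omega), if_pos (by omega)]; ring
        · by_cases h2 : u ≤ j
          · rw [if_pos ⟨h2, by omega⟩, if_neg h1, if_pos h2]; ring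
          · rw [if_neg (by omega), if_neg h1, if_neg h2]; ring
      omega
    · conv_lhs => rw [bitQueryGo.eq_def]
      conv_rhs => rw [bitQueryGo.eq_def]
      rw [dif_neg h, dif_neg h, if_neg (by omega)]
      ring

theorem upd_cancel (bt : List Int) (u : Int) (hu : 1 ≤ u) :
    biUpdateGo (biUpdateGo bt u 1) u (-1) = bt := by
  apply List.ext_getElem
  · rw [upd_length, upd_length]
  · intro i h1 h2
    have l1 : i < (biUpdateGo bt u 1).length := by rw [upd_length]; exact h2
    have e1 := upd_get (biUpdateGo bt u 1) u (-1) hu i l1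
    have e2 := upd_get bt u 1 hu i h2
    have e3 : (biUpdateGo (biUpdateGo bt u 1) u (-1)).getD i 0 = bt.getD i 0 := by
      rw [e1, e2]
      split_ifs <;> ring
    rwa [List.getD_eq_getElem _ _ h1, List.getD_eq_getElem _ _ h2] at e3

-- A's query of the mutated tree = B's query of the fixed array + the ancestor-stack count
theorem node_query (bt bt0 : List Int) (anc : List Int) (j : Int)
    (hanc : ∀ w ∈ anc, 1 ≤ w)
    (hinv : ∀ j : Int, 0 ≤ j → j < (bt0.length : Int) →
      bitQuery bt j = bitQuery bt0 j + (anc.countP (fun w => decide (w ≤ j)) : Nat))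
    (hj : j < (bt0.length : Int)) :
    bitQuery bt j = prefQ bt0 j + ((anc.countP (fun w => decide (0 < w ∧ w ≤ j)) : Nat) : Int) := by
  rw [pref_eq]
  by_cases h0 : 0 ≤ j
  · rw [hinv j h0 hj]
    congr 2
    exact List.countP_congr (fun w hw => by
      have := hanc w hw; simp only [decide_eq_true_eq]; omega)
  · rw [qry_nonpos bt j (by omega), qry_nonpos bt0 j (by omega)]
    have : anc.countP (fun w => decide (0 < w ∧ w ≤ j)) = 0 := by
      rw [List.countP_eq_zero]
      intro w hw
      simp only [decide_eq_true_eq, not_and]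
      omega
    rw [this]
    simp

-- setting any cell of visited to True preserves any True cell (any index, incl. negative)
theorem pyGetD_pySetD_true (xs : List Bool) (i idx : Int)
    (h : PySem.List.pyGetD xs idx false = true) :
    PySem.List.pyGetD (PySem.List.pySetD xs i true) idx false = true := by
  cases hk : PySem.List.pyIdx? xs.length i with
  | none =>
    simpa [PySem.List.pySetD, PySem.List.pySet?, hk] using h
  | some k =>
    have hkl : k < xs.length := by
      unfold PySem.List.pyIdx? at hk
      split_ifs at hk with h1 h2 h3 <;> try simp_all
      · omega
      · omega
    simp only [PySem.List.pySetD, PySem.List.pySet?, hk, Option.map_some, Option.getD_some]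
    cases hm : PySem.List.pyIdx? xs.length idx with
    | none =>
      rw [PySem.List.pyGetD, PySem.List.pyGet?, hm] at h
      simp at h
    | some m =>
      rw [PySem.List.pyGetD, PySem.List.pyGet?, hm] at h
      simp only [Option.bind] at h
      rw [PySem.List.pyGetD, PySem.List.pyGet?, List.length_set, hm]
      simp only [Option.bind]
      rw [List.getElem?_set]
      by_cases hkm : k = m
      · have hml : m < xs.length := by omega
        simp [hkm, hml]
      · simp only [if_neg hkm]
        exact h

-- B's traversal only ever sets visited cells to True: any True cell stays True
theorem visB_mono (graph : List (List Int)) (bt0 : List Int) (n k : Int) :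
    ∀ fuel : Nat, ∀ (u : Int) (anc : List Int) (vis : List Bool) (idx : Int),
    PySem.List.pyGetD vis idx false = true →
    PySem.List.pyGetD (dfsGoB graph bt0 n k fuel u anc vis).2 idx false = true := by
  intro fuel
  induction fuel with
  | zero => intro u anc vis idx h; exact h
  | succ fuel ih =>
    intro u anc vis idx h
    simp only [dfsGoB]
    have hfold : ∀ cs : List Int, ∀ (b : Int) (vis' : List Bool),
        PySem.List.pyGetD vis' idx false = true →
        PySem.List.pyGetD ((cs.foldl (fun (acc : Int × List Bool) v =>
          if PySem.List.pyGetD acc.2 v false = false then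
            (acc.1 + (dfsGoB graph bt0 n k fuel v (anc ++ [u]) acc.2).1,
             (dfsGoB graph bt0 n k fuel v (anc ++ [u]) acc.2).2)
          else acc) (b, vis')).2) idx false = true := by
      intro cs
      induction cs with
      | nil => intro b vis' h'; exact h'
      | cons v rest ihc =>
        intro b vis' h'
        simp only [List.foldl_cons]
        by_cases hv : PySem.List.pyGetD vis' v false = false
        · rw [if_pos hv]
          exact ihc _ _ (ih v (anc ++ [u]) vis' idx h')
        · rw [if_neg hv]
          exact ihc _ _ h'
    exact hfold _ _ _ (pyGetD_pySetD_true vis u idx h)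

theorem safeNodeB_iff (graph : List (List Int)) (biTree : List Int) (n k : Int) (visited : List Bool) (v : Int) :
    safeNodeB graph biTree n k visited v = true ↔
      (1 ≤ v ∧ v < (graph.length : Int) ∧ v < (visited.length : Int) ∧
       max 0 (v - k - 1) < (biTree.length : Int) ∧ min (v + k) n < (biTree.length : Int)) := by
  simp [safeNodeB]

theorem master (graph : List (List Int)) (bt0 : List Int) (n k : Int) (vis0 : List Bool)
    (HROW : ∀ i : ℕ, i < graph.length → safeNodeB graph bt0 n k vis0 (i : Int) = true →
      vis0.getD i false = false → rowOKB graph bt0 n k vis0 (graph.getD i []) = true) :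
    ∀ fuel : Nat, ∀ (u : Int) (bt : List Int) (vis : List Bool) (anc : List Int),
    safeNodeB graph bt0 n k vis0 u = true →
    rowOKB graph bt0 n k vis0 (PySem.List.pyGetD graph u []) = true →
    bt.length = bt0.length →
    (∀ w ∈ anc, 1 ≤ w) →
    (∀ j : Int, 0 ≤ j → j < (bt0.length : Int) →
      bitQuery bt j = bitQuery bt0 j + (anc.countP (fun w => decide (w ≤ j)) : Nat)) →
    (∀ idx : Int, PySem.List.pyGetD vis0 idx false = true →
      PySem.List.pyGetD vis idx false = true) →
    (dfsGoA graph n k fuel u bt vis).1 = (dfsGoB graph bt0 n k fuel u anc vis).1 ∧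
    (dfsGoA graph n k fuel u bt vis).2.1 = bt ∧
    (dfsGoA graph n k fuel u bt vis).2.2 = (dfsGoB graph bt0 n k fuel u anc vis).2 := by
  intro fuel
  induction fuel with
  | zero => intro u bt vis anc _ _ _ _ _ _; exact ⟨rfl, rfl, rfl⟩
  | succ fuel ih =>
    intro u bt vis anc hsafe hrowu hlen hanc hinv hmon
    obtain ⟨hu1, hug, huv, hlou, hhi⟩ := (safeNodeB_iff graph bt0 n k vis0 u).mp hsafe
    have hsp : bitQuery bt (min (u + k) n) - bitQuery bt (max 0 (u - k - 1))
        = prefQ bt0 (min (u + k) n) - prefQ bt0 (max 0 (u - k - 1))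
          + ((anc.countP (fun w => decide (0 < w ∧ w ≤ min (u + k) n)) : Nat) : Int)
          - ((anc.countP (fun w => decide (0 < w ∧ w ≤ max 0 (u - k - 1))) : Nat) : Int) := by
      rw [node_query bt bt0 anc _ hanc hinv (by omega),
          node_query bt bt0 anc _ hanc hinv (by omega)]
      ring
    have hinv1 : ∀ j : Int, 0 ≤ j → j < (bt0.length : Int) →
        bitQuery (biUpdateGo bt u 1) j
          = bitQuery bt0 j + (((anc ++ [u]).countP (fun w => decide (w ≤ j)) : Nat) : Int) := by
      intro j hj0 hjn
      rw [qry_upd bt u 1 j hu1 hj0 (by omega), hinv j hj0 hjn]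
      simp only [List.countP_append, List.countP_cons, List.countP_nil]
      by_cases huj : u ≤ j <;> simp [huj] <;> omega
    have hanc1 : ∀ w ∈ anc ++ [u], 1 ≤ w := by
      intro w hw
      rcases List.mem_append.mp hw with h | h
      · exact hanc w h
      · simp at h; omega
    have hch : ∀ v ∈ PySem.List.pyGetD graph u ([] : List Int),
        PySem.List.pyGetD vis0 v false = true ∨ safeNodeB graph bt0 n k vis0 v = true := by
      intro v hv
      have := (List.all_eq_true.mp hrowu) v hv
      simp only [Bool.or_eq_true, Bool.and_eq_true] at this
      rcases this with ⟨_, h2⟩ | h2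
      · exact Or.inl h2
      · exact Or.inr h2
    have hmon1 : ∀ idx : Int, PySem.List.pyGetD vis0 idx false = true →
        PySem.List.pyGetD (PySem.List.pySetD vis u true) idx false = true :=
      fun idx h => pyGetD_pySetD_true vis u idx (hmon idx h)
    have hfold : ∀ cs : List Int,
        (∀ v ∈ cs, PySem.List.pyGetD vis0 v false = true ∨ safeNodeB graph bt0 n k vis0 v = true) →
        ∀ (a b : Int) (vis' : List Bool),
        (∀ idx : Int, PySem.List.pyGetD vis0 idx false = true →
          PySem.List.pyGetD vis' idx false = true) →
        ((cs.foldl (fun (acc : Int × List Int × List Bool) v =>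
            if PySem.List.pyGetD acc.2.2 v false = false then
              (acc.1 + (dfsGoA graph n k fuel v acc.2.1 acc.2.2).1,
               (dfsGoA graph n k fuel v acc.2.1 acc.2.2).2.1,
               (dfsGoA graph n k fuel v acc.2.1 acc.2.2).2.2)
            else acc) (a, biUpdateGo bt u 1, vis')).1 - a
          = (cs.foldl (fun (acc : Int × List Bool) v =>
            if PySem.List.pyGetD acc.2 v false = false then
              (acc.1 + (dfsGoB graph bt0 n k fuel v (anc ++ [u]) acc.2).1,
               (dfsGoB graph bt0 n k fuel v (anc ++ [u]) acc.2).2)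
            else acc) (b, vis')).1 - b) ∧
        (cs.foldl (fun (acc : Int × List Int × List Bool) v =>
            if PySem.List.pyGetD acc.2.2 v false = false then
              (acc.1 + (dfsGoA graph n k fuel v acc.2.1 acc.2.2).1,
               (dfsGoA graph n k fuel v acc.2.1 acc.2.2).2.1,
               (dfsGoA graph n k fuel v acc.2.1 acc.2.2).2.2)
            else acc) (a, biUpdateGo bt u 1, vis')).2.1 = biUpdateGo bt u 1 ∧
        (cs.foldl (fun (acc : Int × List Int × List Bool) v =>
            if PySem.List.pyGetD acc.2.2 v false = false then
              (acc.1 + (dfsGoA graph n k fuel v acc.2.1 acc.2.2).1,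
               (dfsGoA graph n k fuel v acc.2.1 acc.2.2).2.1,
               (dfsGoA graph n k fuel v acc.2.1 acc.2.2).2.2)
            else acc) (a, biUpdateGo bt u 1, vis')).2.2
          = (cs.foldl (fun (acc : Int × List Bool) v =>
            if PySem.List.pyGetD acc.2 v false = false then
              (acc.1 + (dfsGoB graph bt0 n k fuel v (anc ++ [u]) acc.2).1,
               (dfsGoB graph bt0 n k fuel v (anc ++ [u]) acc.2).2)
            else acc) (b, vis')).2 := by
      intro cs
      induction cs with
      | nil => intro _ a b vis' _; exact ⟨by simp, rfl, rfl⟩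
      | cons v rest ihc =>
        intro hcs a b vis' hm'
        simp only [List.foldl_cons]
        by_cases hv : PySem.List.pyGetD vis' v false = false
        · rw [if_pos hv, if_pos hv]
          have hsafev : safeNodeB graph bt0 n k vis0 v = true := by
            rcases hcs v (by simp) with h0 | h0
            · exact absurd (hm' v h0) (by simp [hv])
            · exact h0
          obtain ⟨hv1, hvg, hvv, _, _⟩ := (safeNodeB_iff graph bt0 n k vis0 v).mp hsafev
          have hvcast : ((v.toNat : ℕ) : Int) = v := by omega
          have hvis0 : vis0.getD v.toNat false = false := by
            by_cases h0 : PySem.List.pyGetD vis0 v false = true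
            · exact absurd (hm' v h0) (by simp [hv])
            · have : PySem.List.pyGetD vis0 v false = false := by
                cases hx : PySem.List.pyGetD vis0 v false
                · rfl
                · exact absurd hx h0
              rw [← hvcast, PySem.List.pyGetD_natCast] at this
              exact this
          have hrowv : rowOKB graph bt0 n k vis0 (PySem.List.pyGetD graph v []) = true := by
            have := HROW v.toNat (by omega) (by rw [hvcast]; exact hsafev) hvis0
            rw [← hvcast, PySem.List.pyGetD_natCast]
            exact this
          obtain ⟨e1, e2, e3⟩ := ih v (biUpdateGo bt u 1) vis' (anc ++ [u])
            hsafev hrowv (by rw [upd_length]; exact hlen) hanc1 hinv1 hm'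
          rw [e1, e2, e3]
          obtain ⟨f1, f2, f3⟩ := ihc (fun w hw => hcs w (by simp [hw]))
            (a + (dfsGoB graph bt0 n k fuel v (anc ++ [u]) vis').1)
            (b + (dfsGoB graph bt0 n k fuel v (anc ++ [u]) vis').1)
            (dfsGoB graph bt0 n k fuel v (anc ++ [u]) vis').2
            (fun idx h => visB_mono graph bt0 n k fuel v (anc ++ [u]) vis' idx (hm' idx h))
          exact ⟨by omega, f2, f3⟩
        · rw [if_neg hv, if_neg hv]
          exact ihc (fun w hw => hcs w (by simp [hw])) a b vis' hm'
    simp only [dfsGoA, dfsGoB]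
    obtain ⟨g1, g2, g3⟩ := hfold (PySem.List.pyGetD graph u ([] : List Int)) hch
      (bitQuery bt (min (u + k) n) - bitQuery bt (max 0 (u - k - 1)))
      (prefQ bt0 (min (u + k) n) - prefQ bt0 (max 0 (u - k - 1))
        + ((anc.countP (fun w => decide (0 < w ∧ w ≤ min (u + k) n)) : Nat) : Int)
        - ((anc.countP (fun w => decide (0 < w ∧ w ≤ max 0 (u - k - 1))) : Nat) : Int))
      (PySem.List.pySetD vis u true) hmon1
    refine ⟨by omega, ?_, g3⟩
    rw [g2]
    exact upd_cancel bt u hu1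

-- ===== VERDICT (by name: the statement is the Claim_ definition above) =====
theorem dfs_spec : Claim_equal_dfs := by
  intro graph biTree n u k visited _ hpre
  obtain ⟨hsafe, hrows⟩ := hpre
  have hu := (safeNodeB_iff graph biTree n k visited u).mp hsafe
  have hucast : ((u.toNat : ℕ) : Int) = u := by omega
  have hrowu : rowOKB graph biTree n k visited (PySem.List.pyGetD graph u []) = true := by
    have := hrows u.toNat (by omega) (by rw [hucast]; exact hsafe) (Or.inl hucast)
    rw [← hucast, PySem.List.pyGetD_natCast]
    exact this
  have HROW : ∀ i : ℕ, i < graph.length → safeNodeB graph biTree n k visited (i : Int) = true →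
      visited.getD i false = false → rowOKB graph biTree n k visited (graph.getD i []) = true :=
    fun i h1 h2 h3 => hrows i h1 h2 (Or.inr h3)
  unfold Spec_dfs dfs dfs_alt
  exact (master graph biTree n k visited HROW (visited.length + 1) u biTree visited []
    hsafe hrowu rfl (by intro w hw; simp at hw)
    (by intro j hj0 hjn; simp) (fun idx h => h)).1
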